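-- pv_equiv track=rewrite | github.com/neelays3003/DAA_Mini_Project | app.py | expand_route
-- ===== SOURCE A (Python) =====
-- def expand_route(route, next_node):
--     """Expand a terminal route into the underlying shortest-path walk."""
--     if not route:
--         return []
--
--     expanded = [route[0]]
--     for i in range(len(route) - 1):
--         u, v = route[i], route[i + 1]
--         if u == v:
--             continue
--
--         if next_node.get(u, {}).get(v) is None:
--             expanded.append(v)
--             continue
--
--         current = u
--         while current != v:
--             current = next_node[current][v]
--             if current is None:
--                 break
--             expanded.append(current)
--
--     return expanded
-- ===== SOURCE B (Python) =====
-- def expand_route(route, next_node):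
--     """Expand a terminal route into the underlying shortest-path walk."""
--     if not route:
--         return []
--
--     def walk(cur, v, rev):
--         # follow next pointers from cur towards v, collecting visited nodes in reverse
--         nxt = next_node[cur][v]
--         if nxt is None:
--             return rev
--         rev = [nxt] + rev
--         return rev if nxt == v else walk(nxt, v, rev)
--
--     def piece(u, v):
--         # the nodes this consecutive pair contributes after u
--         if u == v:
--             return []
--         if next_node.get(u, {}).get(v) is None:
--             return [v]
--         return list(reversed(walk(u, v, [])))
--
--     return [route[0]] + [x for u, v in zip(route, route[1:]) for x in piece(u, v)]
-- ===== Notes on version B (the rewrite author's own statement) =====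
-- stated objective: alternative
-- what changed: A's single mutated accumulator with an inner while loop is replaced by a staged decomposition: a pure per-pair piece(u, v) helper (whose chain is built by a recursive walk on a reversed accumulator, then reversed) and a flat comprehension over zipped consecutive pairs that concatenates the pieces after route[0].
import Mathlib
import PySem

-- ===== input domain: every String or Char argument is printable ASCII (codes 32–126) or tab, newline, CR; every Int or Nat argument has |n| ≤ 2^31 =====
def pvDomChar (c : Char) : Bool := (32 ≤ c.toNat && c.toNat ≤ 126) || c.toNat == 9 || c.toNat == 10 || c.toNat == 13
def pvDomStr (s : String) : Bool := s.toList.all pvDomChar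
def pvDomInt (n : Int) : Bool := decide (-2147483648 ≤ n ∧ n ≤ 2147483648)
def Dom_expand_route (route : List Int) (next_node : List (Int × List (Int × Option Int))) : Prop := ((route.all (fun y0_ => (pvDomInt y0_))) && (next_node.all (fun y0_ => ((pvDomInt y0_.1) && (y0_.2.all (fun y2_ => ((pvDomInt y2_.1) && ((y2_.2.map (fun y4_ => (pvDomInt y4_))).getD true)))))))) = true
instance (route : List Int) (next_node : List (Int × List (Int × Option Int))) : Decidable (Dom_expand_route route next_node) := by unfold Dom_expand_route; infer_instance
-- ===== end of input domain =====

-- B replaces A's single mutated accumulator + inner while loop by a staged decomposition: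
-- a pure per-pair piece helper (reverse-accumulator recursive walk, then reversed) flat-mapped
-- over zipped consecutive pairs (alternative decomposition, same cost); returns agree on Pre_.


-- ===== PORT A =====
-- next_node[u][v] as Python sees it: `none` = a KeyError (outer or inner key missing),
-- `some none` = the stored value None, `some (some w)` = the stored successor w.
-- (dict lookup = first match on the association list, per the type convention)
def stepA (next_node : List (Int × List (Int × Option Int))) (v u : Int) : Option (Option Int) :=
  (next_node.lookup u).bind (fun d => d.lookup v)

-- A's `while current != v:` loop; fuel only makes the transcription total (Python can
-- diverge or raise KeyError here; such inputs are outside Pre_).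
def chainA (next_node : List (Int × List (Int × Option Int))) (v : Int) :
    Nat → Int → List Int → List Int
  | 0, _, acc => acc
  | fuel + 1, current, acc =>
    if current == v then acc
    else
      match stepA next_node v current with
      | none => acc              -- KeyError in Python (outside Pre_)
      | some r =>
        match r with
        | none => acc            -- current is None: break
        | some w => chainA next_node v fuel w (acc ++ [w])

def expand_route (route : List Int) (next_node : List (Int × List (Int × Option Int))) : List Int :=
  match route with
  | [] => []
  | r0 :: _ =>
    (List.range (route.length - 1)).foldl
      (fun expanded i =>
        let u := route.getD i 0          -- route[i], i always in range
        let v := route.getD (i + 1) 0    -- route[i+1], always in range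
        if u == v then expanded
        else
          match stepA next_node v u with   -- next_node.get(u, {}).get(v)
          | none => expanded ++ [v]         -- `is None` branch (key missing)
          | some r =>
            match r with
            | none => expanded ++ [v]       -- `is None` branch (stored None)
            | some _ => chainA next_node v (next_node.length + 1) u expanded)
      [r0]

-- ===== PORT B =====
-- B's recursive walk(cur, v, rev): follows next pointers collecting nodes in reverse;
-- the same totality fuel as A's loop (divergence/KeyError inputs are outside Pre_).
def walkB (next_node : List (Int × List (Int × Option Int))) (v : Int) :
    Nat → Int → List Int → List Int
  | 0, _, rev => rev
  | fuel + 1, cur, rev =>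
    match (next_node.find? (fun p => p.1 == cur)).map Prod.snd with  -- next_node[cur]
    | none => rev                                                    -- KeyError (outside Pre_)
    | some d =>
      match (d.find? (fun p => p.1 == v)).map Prod.snd with          -- …[v]
      | none => rev                                                  -- KeyError (outside Pre_)
      | some none => rev                                             -- nxt is None
      | some (some nxt) =>
        if nxt == v then nxt :: rev else walkB next_node v fuel nxt (nxt :: rev)

-- B's piece(u, v): the nodes a consecutive pair contributes after u
def pieceB (next_node : List (Int × List (Int × Option Int))) (u v : Int) : List Int :=
  if u == v then []
  else
    match ((next_node.find? (fun p => p.1 == u)).map Prod.snd).bind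
            (fun d => (d.find? (fun p => p.1 == v)).map Prod.snd) with
    | some (some _) => (walkB next_node v (next_node.length + 1) u []).reverse
    | _ => [v]

def expand_route_alt (route : List Int) (next_node : List (Int × List (Int × Option Int))) : List Int :=
  match route with
  | [] => []
  | r0 :: rest =>
    r0 :: (route.zip rest).flatMap (fun p => pieceB next_node p.1 p.2)

-- ===== PRECONDITION & SPEC =====
-- the step map of the next-pointer graph, restated for the precondition (independent of the ports)
def preStep (next_node : List (Int × List (Int × Option Int))) (v u : Int) : Option (Option Int) :=
  (next_node.lookup u).bind (fun d => d.lookup v)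

-- One pair-wise chain check: following the next pointers from u towards v must reach v or a
-- stored None without a missing key.  A node chain longer than the table must revisit a node
-- and hence loop forever, so the bound next_node.length + 1 is exact, not a size cap.
def chainOk (next_node : List (Int × List (Int × Option Int))) (v : Int) : Nat → Int → Bool
  | 0, _ => false                          -- chain revisits a node: Python diverges
  | fuel + 1, u =>
    if u == v then true
    else
      match preStep next_node v u with
      | none => false                      -- KeyError
      | some r =>
        match r with
        | none => true
        | some w => chainOk next_node v fuel w

def pairOk (next_node : List (Int × List (Int × Option Int))) (u v : Int) : Bool :=
  if u == v then true
  else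
    match preStep next_node v u with
    | none => true
    | some r =>
      match r with
      | none => true
      | some _ => chainOk next_node v (next_node.length + 1) u

-- Pre_ excludes exactly the inputs where Python A raises a KeyError on an intermediate chain
-- node or loops forever on a next-pointer cycle; A returns on every other input.
def Pre_expand_route (route : List Int) (next_node : List (Int × List (Int × Option Int))) : Prop :=
  ∀ p ∈ route.zip route.tail, pairOk next_node p.1 p.2 = true
instance (route : List Int) (next_node : List (Int × List (Int × Option Int))) : Decidable (Pre_expand_route route next_node) := by unfold Pre_expand_route; infer_instance

def pvWitness_expand_route : List Int × (List (Int × List (Int × Option Int))) :=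
  ([1, 3, 3, 5], [(1, [(3, some 2), (5, none)]), (2, [(3, some 3)]), (3, [(5, some 5)])])

def Spec_expand_route (route : List Int) (next_node : List (Int × List (Int × Option Int))) (out : List Int) : Prop := out = expand_route_alt route next_node
instance (route : List Int) (next_node : List (Int × List (Int × Option Int))) (out : List Int) : Decidable (Spec_expand_route route next_node out) := by unfold Spec_expand_route; infer_instance

-- ===== CLAIM (what is proved, stated in full; the proofs are below) =====
def Claim_equal_expand_route : Prop := ∀ (route : List Int) (next_node : List (Int × List (Int × Option Int))), Dom_expand_route route next_node → Pre_expand_route route next_node → Spec_expand_route route next_node (expand_route route next_node)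

-- ===== LEMMAS AND PROOFS =====

-- B's find?-based association lookup is Python's dict lookup, i.e. A's List.lookup
theorem find?_eq_lookup {β : Type} (l : List (Int × β)) (k : Int) :
    (l.find? (fun p => p.1 == k)).map Prod.snd = l.lookup k := by
  induction l with
  | nil => rfl
  | cons p rest ih =>
    by_cases h : p.1 = k
    · simp [List.find?, List.lookup, h]
    · have h1 : (p.1 == k) = false := by simp [h]
      have h2 : (k == p.1) = false := by simp [Ne.symm h]
      simp only [List.find?, List.lookup, h1, h2]
      exact ih

theorem stepB_eq_stepA (next_node : List (Int × List (Int × Option Int))) (v u : Int) :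
    ((next_node.find? (fun p => p.1 == u)).map Prod.snd).bind
        (fun d => (d.find? (fun p => p.1 == v)).map Prod.snd) = stepA next_node v u := by
  unfold stepA
  rw [find?_eq_lookup]
  cases next_node.lookup u with
  | none => rfl
  | some d => simp [find?_eq_lookup]

-- one-step unfolding equations (cited by rw to unfold exactly once)
theorem chainA_succ (next_node : List (Int × List (Int × Option Int))) (v : Int)
    (fuel : Nat) (current : Int) (acc : List Int) :
    chainA next_node v (fuel + 1) current acc =
      (if current == v then acc
       else
         match stepA next_node v current with
         | none => acc
         | some r =>
           match r with
           | none => acc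
           | some w => chainA next_node v fuel w (acc ++ [w])) := rfl

theorem walkB_succ (next_node : List (Int × List (Int × Option Int))) (v : Int)
    (fuel : Nat) (cur : Int) (rev : List Int) :
    walkB next_node v (fuel + 1) cur rev =
      (match (next_node.find? (fun p => p.1 == cur)).map Prod.snd with
       | none => rev
       | some d =>
         match (d.find? (fun p => p.1 == v)).map Prod.snd with
         | none => rev
         | some none => rev
         | some (some nxt) =>
           if nxt == v then nxt :: rev else walkB next_node v fuel nxt (nxt :: rev)) := rfl

theorem chainA_self (next_node : List (Int × List (Int × Option Int))) (v : Int) :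
    ∀ (fuel : Nat) (acc : List Int), chainA next_node v fuel v acc = acc := by
  intro fuel acc
  cases fuel with
  | zero => rfl
  | succ fuel => simp [chainA_succ]

-- the reverse accumulator of walkB only collects: it factors out
theorem walkB_append (next_node : List (Int × List (Int × Option Int))) (v : Int) :
    ∀ (fuel : Nat) (cur : Int) (rev : List Int),
      walkB next_node v fuel cur rev = walkB next_node v fuel cur [] ++ rev := by
  intro fuel
  induction fuel with
  | zero => intro cur rev; simp [walkB]
  | succ fuel ih =>
    intro cur rev
    rw [walkB_succ, walkB_succ]
    cases h1 : (next_node.find? (fun p => p.1 == cur)).map Prod.snd with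
    | none => simp
    | some d =>
      simp only [h1]
      cases h2 : (d.find? (fun p => p.1 == v)).map Prod.snd with
      | none => simp [h2]
      | some r =>
        cases r with
        | none => simp [h2]
        | some nxt =>
          simp only [h2]
          by_cases hv : nxt = v
          · simp [hv]
          · have hvb : (nxt == v) = false := by simp [hv]
            simp only [hvb, Bool.false_eq_true, if_false]
            rw [ih nxt (nxt :: rev), ih nxt [nxt]]
            simp

-- A's while loop equals acc ++ reverse of B's walk, for matching fuel, whenever u ≠ v on entry.
theorem chainA_eq_walkB (next_node : List (Int × List (Int × Option Int))) (v : Int) :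
    ∀ (fuel : Nat) (u : Int) (acc : List Int), u ≠ v →
      chainA next_node v (fuel + 1) u acc
        = acc ++ (walkB next_node v (fuel + 1) u []).reverse := by
  intro fuel
  induction fuel with
  | zero =>
    intro u acc hu
    have hb : (u == v) = false := by simp [hu]
    rw [chainA_succ, walkB_succ, ← stepB_eq_stepA]
    simp only [hb, Bool.false_eq_true, if_false]
    cases h1 : (next_node.find? (fun p => p.1 == u)).map Prod.snd with
    | none => simp
    | some d =>
      simp only [Option.bind_some]
      cases h2 : (d.find? (fun p => p.1 == v)).map Prod.snd with
      | none => simp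
      | some r =>
        cases r with
        | none => simp
        | some w =>
          by_cases hw : w = v
          · subst hw; simp [chainA_self]
          · have hwb : (w == v) = false := by simp [hw]
            simp [hwb, chainA, walkB]
  | succ fuel ih =>
    intro u acc hu
    have hb : (u == v) = false := by simp [hu]
    rw [chainA_succ, walkB_succ, ← stepB_eq_stepA]
    simp only [hb, Bool.false_eq_true, if_false]
    cases h1 : (next_node.find? (fun p => p.1 == u)).map Prod.snd with
    | none => simp
    | some d =>
      simp only [Option.bind_some]
      cases h2 : (d.find? (fun p => p.1 == v)).map Prod.snd with
      | none => simp
      | some r =>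
        cases r with
        | none => simp
        | some w =>
          by_cases hw : w = v
          · subst hw; simp [chainA_self]
          · have hwb : (w == v) = false := by simp [hw]
            simp only [hwb, Bool.false_eq_true, if_false]
            rw [ih w (acc ++ [w]) hw, walkB_append next_node v (fuel + 1) w [w]]
            simp

-- A's per-pair loop body appends exactly B's piece
theorem bodyA_eq_pieceB (next_node : List (Int × List (Int × Option Int)))
    (expanded : List Int) (u v : Int) :
    (if u == v then expanded
     else
       match stepA next_node v u with
       | none => expanded ++ [v]
       | some r =>
         match r with
         | none => expanded ++ [v]
         | some _ => chainA next_node v (next_node.length + 1) u expanded)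
      = expanded ++ pieceB next_node u v := by
  unfold pieceB
  rw [stepB_eq_stepA]
  by_cases huv : u = v
  · simp [huv]
  · have hb : (u == v) = false := by simp [huv]
    cases h : stepA next_node v u with
    | none => simp [hb, h]
    | some o =>
      cases o with
      | none => simp [hb, h]
      | some w =>
        simp only [hb, Bool.false_eq_true, if_false, h]
        exact chainA_eq_walkB next_node v _ u expanded huv

-- A's index loop over List.range, as a function of the remaining list
def loopA (next_node : List (Int × List (Int × Option Int)))
    (l : List Int) (acc : List Int) : List Int :=
  (List.range (l.length - 1)).foldl
    (fun expanded i =>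
      let u := l.getD i 0
      let v := l.getD (i + 1) 0
      if u == v then expanded
      else
        match stepA next_node v u with
        | none => expanded ++ [v]
        | some r =>
          match r with
          | none => expanded ++ [v]
          | some _ => chainA next_node v (next_node.length + 1) u expanded)
    acc

theorem loopA_eq_flatMap (next_node : List (Int × List (Int × Option Int))) :
    ∀ (l : List Int) (acc : List Int),
      loopA next_node l acc
        = acc ++ (l.zip l.tail).flatMap (fun p => pieceB next_node p.1 p.2) := by
  intro l
  induction l with
  | nil => intro acc; simp [loopA]
  | cons u rest ih =>
    intro acc
    match rest with
    | [] => simp [loopA]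
    | v :: rest' =>
      unfold loopA
      simp only [List.length_cons, Nat.add_sub_cancel, List.range_succ_eq_map,
        List.foldl_cons, List.foldl_map, List.getD_cons_zero, List.getD_cons_succ,
        List.zip_cons_cons, List.tail_cons, List.flatMap_cons]
      rw [bodyA_eq_pieceB, ← List.append_assoc]
      exact ih (acc ++ pieceB next_node u v)

-- ===== VERDICT (by name: the statement is the Claim_ definition above) =====
theorem expand_route_spec : Claim_equal_expand_route := by
  intro route next_node _ _
  unfold Spec_expand_route
  cases route with
  | nil => rfl
  | cons r0 rest =>
    show loopA next_node (r0 :: rest) [r0]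
      = r0 :: ((r0 :: rest).zip rest).flatMap (fun p => pieceB next_node p.1 p.2)
    rw [loopA_eq_flatMap]
    simp
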